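-- pv_equiv track=rewrite | github.com/griffith-algo/basic-algo | week-3/problem-set/prob5.py | find_largest_position
-- ===== SOURCE A (Python) =====
-- def find_largest_position(arr, left, right):
--     """Return the index of the largest value using divide and conquer.
--
--     Args:
--         arr (list): The list being processed by the algorithm.
--         left (object): The left boundary or left-side data used by the algorithm.
--         right (object): The right boundary or right-side data used by the algorithm.
--
--     Returns:
--         int: The integer result produced by the algorithm.
--     """
--     if left == right:
--         return left
--     else:
--         mid = (left + right) // 2
--         left_max_position = find_largest_position(arr, left, mid)
--         right_max_position = find_largest_position(arr, mid + 1, right)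
--         if arr[left_max_position] >= arr[right_max_position]:
--             return left_max_position
--         else:
--             return right_max_position
-- ===== SOURCE B (Python) =====
-- def find_largest_position(arr, left, right):
--     return max(range(left, right + 1), key=lambda i: arr[i])
-- ===== Notes on version B (the rewrite author's own statement) =====
-- stated objective: idiomatic
-- what changed: Replaced the divide-and-conquer recursion with the standard-library argmax idiom max(range(left, right+1), key=...), whose first-maximal rule preserves A's leftmost-max tie-breaking.
-- outside the precondition, e.g. on find_largest_position([], 3, 3): A returns 3, B raises IndexError
import Mathlib
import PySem

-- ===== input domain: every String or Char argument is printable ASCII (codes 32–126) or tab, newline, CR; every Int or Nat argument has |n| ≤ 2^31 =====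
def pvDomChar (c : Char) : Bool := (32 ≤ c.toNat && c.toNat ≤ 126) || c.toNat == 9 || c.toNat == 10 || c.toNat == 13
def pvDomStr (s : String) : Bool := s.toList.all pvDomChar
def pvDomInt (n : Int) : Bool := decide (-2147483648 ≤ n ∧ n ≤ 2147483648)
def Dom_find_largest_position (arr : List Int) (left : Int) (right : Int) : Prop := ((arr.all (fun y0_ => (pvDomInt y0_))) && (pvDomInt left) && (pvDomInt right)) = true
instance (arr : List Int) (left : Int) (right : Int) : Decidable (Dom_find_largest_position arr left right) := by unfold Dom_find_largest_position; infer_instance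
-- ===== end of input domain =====

-- B replaces A's divide-and-conquer recursion with the library argmax idiom
-- (max over the index range, keyed by the element; first maximal index wins ties,
-- matching A's leftmost-max rule). Objective: idiomatic; same O(n) comparisons.

-- ===== PORT A =====
-- Literal port of A's recursion; the 'else left' branch only totalises the case
-- left > right, on which the Python A recurses forever (excluded by Pre_).
def find_largest_position (arr : List Int) (left : Int) (right : Int) : Int :=
  if left = right then left
  else if h : left < right then
    let mid := PySem.Int.floordiv (left + right) 2
    let left_max_position := find_largest_position arr left mid
    let right_max_position := find_largest_position arr (mid + 1) right
    if PySem.List.pyGetD arr left_max_position 0 ≥ PySem.List.pyGetD arr right_max_position 0 then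
      left_max_position
    else
      right_max_position
  else left
termination_by (right - left).toNat
decreasing_by
  · have e : PySem.Int.floordiv (left + right) 2 = (left + right) / 2 :=
      PySem.Int.floordiv_eq_ediv_of_pos (by omega)
    simp only [e]; omega
  · have e : PySem.Int.floordiv (left + right) 2 = (left + right) / 2 :=
      PySem.Int.floordiv_eq_ediv_of_pos (by omega)
    simp only [e]; omega

-- ===== PORT B =====
-- Python's max(…, key) keeps the FIRST element with the maximal key: fold with a
-- strict '>' update from the head. On an empty range Python's max raises ValueError
-- (excluded by Pre_); the [] branch only totalises that case.
def find_largest_position_alt (arr : List Int) (left : Int) (right : Int) : Int :=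
  match PySem.List.pyRange left (right + 1) 1 with
  | [] => left
  | x :: xs =>
    xs.foldl
      (fun best i =>
        if PySem.List.pyGetD arr i 0 > PySem.List.pyGetD arr best 0 then i else best)
      x

-- ===== PRECONDITION & SPEC =====
-- Pre_ excludes left > right (Python A recurses forever there: RecursionError) and
-- indices outside [-len(arr), len(arr)) (A raises IndexError when left < right; when
-- left = right A returns left without touching arr, but B's max still indexes arr and
-- raises IndexError, so those degenerate out-of-range inputs are excluded too).
def Pre_find_largest_position (arr : List Int) (left : Int) (right : Int) : Prop :=
  left ≤ right ∧ -(arr.length : Int) ≤ left ∧ right < (arr.length : Int)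
instance (arr : List Int) (left : Int) (right : Int) : Decidable (Pre_find_largest_position arr left right) := by unfold Pre_find_largest_position; infer_instance

def pvWitness_find_largest_position : List Int × Int × Int := ([3, 1, 4, 1, 5], 0, 4)

def Spec_find_largest_position (arr : List Int) (left : Int) (right : Int) (out : Int) : Prop := out = find_largest_position_alt arr left right
instance (arr : List Int) (left : Int) (right : Int) (out : Int) : Decidable (Spec_find_largest_position arr left right out) := by unfold Spec_find_largest_position; infer_instance

-- ===== CLAIM (what is proved, stated in full; the proofs are below) =====
def Claim_equal_find_largest_position : Prop := ∀ (arr : List Int) (left : Int) (right : Int), Dom_find_largest_position arr left right → Pre_find_largest_position arr left right → Spec_find_largest_position arr left right (find_largest_position arr left right)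

-- ===== LEMMAS AND PROOFS =====

-- The scan B performs after peeling the head off its range: fold over [l+1, r] seeded with l.
def pvScan (arr : List Int) (l r : Int) : Int :=
  (PySem.List.pyRange (l + 1) (r + 1) 1).foldl
    (fun best i =>
      if PySem.List.pyGetD arr i 0 > PySem.List.pyGetD arr best 0 then i else best) l

theorem pv_alt_eq_scan (arr : List Int) (l r : Int) (h : l ≤ r) :
    find_largest_position_alt arr l r = pvScan arr l r := by
  rw [find_largest_position_alt, PySem.List.pyRange_one_cons (by omega : l < r + 1)]
  rfl

-- The scan's fold, started from an arbitrary seed x over a nonempty index list i :: is,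
-- equals "seed x beaten (strictly) by the fold started from the list's own head".
theorem pv_foldl_seed (arr : List Int) (x i : Int) (is : List Int) :
    is.foldl (fun best j =>
        if PySem.List.pyGetD arr j 0 > PySem.List.pyGetD arr best 0 then j else best)
      (if PySem.List.pyGetD arr i 0 > PySem.List.pyGetD arr x 0 then i else x)
    = (if PySem.List.pyGetD arr
          (is.foldl (fun best j =>
              if PySem.List.pyGetD arr j 0 > PySem.List.pyGetD arr best 0 then j else best) i) 0
         > PySem.List.pyGetD arr x 0 then
         (is.foldl (fun best j =>
             if PySem.List.pyGetD arr j 0 > PySem.List.pyGetD arr best 0 then j else best) i)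
       else x) := by
  induction is generalizing x i with
  | nil => simp [List.foldl]
  | cons j js ih =>
    simp only [List.foldl]
    rw [ih, ih]
    split_ifs with h1 h2 h3 h4 h5 <;> first | rfl | (exfalso; omega)

-- The scan on [l, r] splits at any interior point m: it is the scan on the right half
-- if that index strictly beats the scan on the left half, else the scan on the left half.
theorem pv_scan_split (arr : List Int) (l m r : Int) (h1 : l ≤ m) (h2 : m < r) :
    pvScan arr l r =
      (if PySem.List.pyGetD arr (pvScan arr (m + 1) r) 0
          > PySem.List.pyGetD arr (pvScan arr l m) 0 then
        pvScan arr (m + 1) r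
      else pvScan arr l m) := by
  simp only [pvScan]
  rw [PySem.List.pyRange_one_append (l + 1) (m + 1) (r + 1) (by omega) (by omega),
      List.foldl_append, PySem.List.pyRange_one_cons (show m + 1 < r + 1 by omega)]
  simp only [List.foldl_cons]
  rw [pv_foldl_seed]

-- A equals the scan on every left ≤ right (no bounds on the indices are needed:
-- both ports read through pyGetD with the same default).
theorem pv_main (arr : List Int) : ∀ (n : Nat) (left right : Int),
    (right - left).toNat = n → left ≤ right →
    find_largest_position arr left right = pvScan arr left right := by
  intro n
  induction n using Nat.strong_induction_on with
  | _ n ih =>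
    intro left right hn hle
    by_cases heq : left = right
    · subst heq
      rw [find_largest_position, pvScan, PySem.List.pyRange_one_eq_nil (by omega)]
      simp
    · have hlt : left < right := lt_of_le_of_ne hle heq
      have e : PySem.Int.floordiv (left + right) 2 = (left + right) / 2 :=
        PySem.Int.floordiv_eq_ediv_of_pos (by omega)
      have hmid : left ≤ PySem.Int.floordiv (left + right) 2 ∧
          PySem.Int.floordiv (left + right) 2 < right := by rw [e]; omega
      rw [find_largest_position]
      simp only [heq, if_false, hlt, dif_pos]
      set mid := PySem.Int.floordiv (left + right) 2 with hmiddef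
      have hA1 : find_largest_position arr left mid = pvScan arr left mid :=
        ih (mid - left).toNat (by omega) left mid rfl (by omega)
      have hA2 : find_largest_position arr (mid + 1) right = pvScan arr (mid + 1) right :=
        ih (right - (mid + 1)).toNat (by omega) (mid + 1) right rfl (by omega)
      rw [hA1, hA2, pv_scan_split arr left mid right (by omega) (by omega)]
      split_ifs with h1 h2 h3 <;> first | rfl | (exfalso; omega)

-- ===== VERDICT (by name: the statement is the Claim_ definition above) =====
theorem find_largest_position_spec : Claim_equal_find_largest_position := by
  intro arr left right _ hpre
  unfold Spec_find_largest_position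
  rw [pv_alt_eq_scan arr left right hpre.1]
  exact pv_main arr (right - left).toNat left right rfl hpre.1
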